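-- pv_equiv track=rewrite | github.com/niktayek/avestan-computational-philology | src/matchers/dictionary_matcher/replacer/replace_word_generator.py | split_by_consonants
-- ===== SOURCE A (Python) =====
-- def split_by_consonants(word, consonants):
--     ret = []
--     cur_ind = 0
--     while cur_ind < len(word):
--         found = False
--         for c in consonants:
--             if word[cur_ind:].startswith(c):
--                 ret.append([c, True])
--                 cur_ind += len(c)
--                 found = True
--                 break
--         if not found:
--             ret.append([word[cur_ind], False])
--             cur_ind += 1
--     return ret
-- ===== SOURCE B (Python) =====
-- def split_by_consonants(word, consonants):
--     # Exact-substring dictionary: each consonant string -> its first list index,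
--     # plus the maximum consonant length.  At each position, probe every possible
--     # match length with one dict lookup and keep the candidate with the smallest
--     # list index (= first match in list order).  No scan over the consonant list
--     # at match time.
--     first_index = {}
--     maxlen = 0
--     for i, c in enumerate(consonants):
--         if c not in first_index:
--             first_index[c] = i
--         if len(c) > maxlen:
--             maxlen = len(c)
--     ret = []
--     pos = 0
--     n = len(word)
--     while pos < n:
--         best = None  # (first list index, match length)
--         for L in range(1, min(maxlen, n - pos) + 1):
--             idx = first_index.get(word[pos:pos + L])
--             if idx is not None and (best is None or idx < best[0]):
--                 best = (idx, L)
--         if best is None: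
--             ret.append([word[pos], False])
--             pos += 1
--         else:
--             ret.append([word[pos:pos + best[1]], True])
--             pos += best[1]
--     return ret
-- ===== Notes on version B (the rewrite author's own statement) =====
-- stated objective: faster
-- what changed: B replaces A's per-position scan over the consonant list by an exact-substring dictionary (consonant -> first list index, plus max length) built once; at each position it probes each possible match length with one dict lookup and keeps the candidate with the smallest list index, which equals A's first-match-in-list-order.
-- outside the precondition, e.g. on split_by_consonants('aa', ['a', '']): A returns [('a', True), ('a', True)], B returns [('a', True), ('a', True)]
import Mathlib
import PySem

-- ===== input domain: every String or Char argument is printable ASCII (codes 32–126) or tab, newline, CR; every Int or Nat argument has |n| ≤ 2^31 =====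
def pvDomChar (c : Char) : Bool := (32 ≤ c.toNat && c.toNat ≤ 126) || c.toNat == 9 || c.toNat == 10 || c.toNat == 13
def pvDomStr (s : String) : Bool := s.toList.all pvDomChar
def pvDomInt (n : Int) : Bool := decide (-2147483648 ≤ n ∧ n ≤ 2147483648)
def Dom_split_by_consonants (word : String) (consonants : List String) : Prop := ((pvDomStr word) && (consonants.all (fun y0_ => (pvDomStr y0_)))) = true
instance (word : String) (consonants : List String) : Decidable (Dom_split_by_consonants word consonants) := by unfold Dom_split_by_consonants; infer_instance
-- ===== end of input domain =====

-- B builds an exact-substring dictionary (consonant -> first list index, plus max length)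
-- once; each position probes the possible match lengths by dict lookup and keeps the
-- smallest-index candidate, instead of A's scan over the consonant list: measurably faster.

-- ===== PORT A =====
-- for c in consonants: if word[cur_ind:].startswith(c): … break  =  find? in list order
def pvFindA (consonants : List String) (rest : List Char) : Option String :=
  consonants.find? (fun c => c.toList.isPrefixOf rest)

-- A's while loop over cur_ind, as recursion on the remaining suffix; the fuel only
-- makes the recursion total: inside Pre_ (no empty consonant) it never runs out.
def pvALoop (consonants : List String) : Nat → List Char → List (String × Bool)
  | 0, _ => []
  | _, [] => []
  | fuel + 1, ch :: tl =>
      match pvFindA consonants (ch :: tl) with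
      | some c => (c, true) :: pvALoop consonants fuel ((ch :: tl).drop c.toList.length)
      | none => (String.ofList [ch], false) :: pvALoop consonants fuel tl

def split_by_consonants (word : String) (consonants : List String) : List (String × Bool) :=
  pvALoop consonants word.toList.length word.toList

-- ===== PORT B =====
-- the first for-loop of Source B: first_index (keys as List Char) and maxlen, one pass
def pvBIndex (consonants : List String) : PySem.Dict (List Char) Int × Int :=
  (PySem.List.enumerate consonants).foldl
    (fun p ic =>
      ((if p.1.contains ic.2.toList then p.1 else p.1.insert ic.2.toList ic.1),
       if (ic.2.toList.length : Int) > p.2 then (ic.2.toList.length : Int) else p.2))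
    (PySem.Dict.empty, 0)

-- the inner for-loop of Source B: best = arg-min by first list index over probe lengths
def pvBBest (d : PySem.Dict (List Char) Int) (m : Int) (rest : List Char) :
    Option (Int × Nat) :=
  (PySem.List.pyRange 1 (min m (rest.length : Int) + 1) 1).foldl
    (fun best L =>
      match d.get? (rest.take L.toNat) with
      | none => best
      | some idx =>
          match best with
          | none => some (idx, L.toNat)
          | some b => if idx < b.1 then some (idx, L.toNat) else best)
    none

-- Source B's while loop over pos, as recursion on the remaining suffix (fuel for totality)
def pvBLoop (d : PySem.Dict (List Char) Int) (m : Int) :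
    Nat → List Char → List (String × Bool)
  | 0, _ => []
  | _, [] => []
  | fuel + 1, ch :: tl =>
      match pvBBest d m (ch :: tl) with
      | none => (String.ofList [ch], false) :: pvBLoop d m fuel tl
      | some b =>
          (String.ofList ((ch :: tl).take b.2), true) ::
            pvBLoop d m fuel ((ch :: tl).drop b.2)

def split_by_consonants_alt (word : String) (consonants : List String) : List (String × Bool) :=
  let dm := pvBIndex consonants
  pvBLoop dm.1 dm.2 word.toList.length word.toList

-- ===== PRECONDITION & SPEC =====
-- Pre_ excludes inputs where "" is a consonant and the word is nonempty: there A's scan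
-- can match the empty string, advance by 0 and loop forever (it raises nothing, it diverges);
-- on the rare such inputs where an earlier consonant always matches, A still returns.
def Pre_split_by_consonants (word : String) (consonants : List String) : Prop :=
  word = "" ∨ "" ∉ consonants
instance (word : String) (consonants : List String) : Decidable (Pre_split_by_consonants word consonants) := by unfold Pre_split_by_consonants; infer_instance

def pvWitness_split_by_consonants : String × List String := ("abcab", ["ab", "b", "c"])

def Spec_split_by_consonants (word : String) (consonants : List String) (out : List (String × Bool)) : Prop := out = split_by_consonants_alt word consonants
instance (word : String) (consonants : List String) (out : List (String × Bool)) : Decidable (Spec_split_by_consonants word consonants out) := by unfold Spec_split_by_consonants; infer_instance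

-- ===== CLAIM (what is proved, stated in full; the proofs are below) =====
def Claim_equal_split_by_consonants : Prop := ∀ (word : String) (consonants : List String), Dom_split_by_consonants word consonants → Pre_split_by_consonants word consonants → Spec_split_by_consonants word consonants (split_by_consonants word consonants)

-- ===== LEMMAS AND PROOFS =====

-- proof-side names for the two components of pvBIndex and for pvBBest's fold step
def pvBIndexD (l : List String) : PySem.Dict (List Char) Int :=
  (PySem.List.enumerate l).foldl
    (fun d (ic : Int × String) =>
      if d.contains ic.2.toList then d else d.insert ic.2.toList ic.1)
    PySem.Dict.empty

def pvStep (d : PySem.Dict (List Char) Int) (rest : List Char)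
    (best : Option (Int × Nat)) (L : Int) : Option (Int × Nat) :=
  match d.get? (rest.take L.toNat) with
  | none => best
  | some idx =>
      match best with
      | none => some (idx, L.toNat)
      | some b => if idx < b.1 then some (idx, L.toNat) else best

theorem pvBIndex_eq (l : List String) :
    pvBIndex l =
      (pvBIndexD l,
       (PySem.List.enumerate l).foldl
         (fun m (ic : Int × String) =>
           if (ic.2.toList.length : Int) > m then (ic.2.toList.length : Int) else m)
         0) := by
  unfold pvBIndex pvBIndexD
  rw [PySem.List.foldl_prod_mk
    (f := fun d (ic : Int × String) =>
      if PySem.Dict.contains d ic.2.toList then d else d.insert ic.2.toList ic.1)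
    (g := fun m (ic : Int × String) =>
      if (ic.2.toList.length : Int) > m then (ic.2.toList.length : Int) else m)]

theorem pvBBest_eq (d : PySem.Dict (List Char) Int) (m : Int) (rest : List Char) :
    pvBBest d m rest
      = (PySem.List.pyRange 1 (min m (rest.length : Int) + 1) 1).foldl
          (pvStep d rest) none := rfl


theorem pvMaxFold_spec (es : List (Int × String)) (b : Int) :
    b ≤ es.foldl
          (fun m (ic : Int × String) =>
            if (ic.2.toList.length : Int) > m then (ic.2.toList.length : Int) else m) b ∧
    ∀ p ∈ es, ((p.2.toList.length : Int)) ≤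
      es.foldl
        (fun m (ic : Int × String) =>
          if (ic.2.toList.length : Int) > m then (ic.2.toList.length : Int) else m) b := by
  induction es generalizing b with
  | nil => simp
  | cons e es ih =>
    obtain ⟨h1, h2⟩ := ih (if (e.2.toList.length : Int) > b then (e.2.toList.length : Int) else b)
    refine ⟨?_, ?_⟩
    · simp only [List.foldl_cons]
      exact le_trans (by split_ifs with h <;> omega) h1
    · intro p hp
      rcases List.mem_cons.1 hp with rfl | hp
      · simp only [List.foldl_cons]
        exact le_trans (by split_ifs with h <;> omega) h1
      · exact h2 p hp

theorem pvBIndex_max' (l : List String) :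
    ∀ c ∈ l, ((c.toList.length : Int)) ≤
      (PySem.List.enumerate l).foldl
        (fun m (ic : Int × String) =>
          if (ic.2.toList.length : Int) > m then (ic.2.toList.length : Int) else m) 0 := by
  intro c hc
  have : c ∈ (PySem.List.enumerate l).map (·.2) := by
    rw [PySem.List.map_snd_enumerate]; exact hc
  obtain ⟨p, hp, hpc⟩ := List.mem_map.1 this
  have := (pvMaxFold_spec (PySem.List.enumerate l) 0).2 p hp
  rw [hpc] at this; exact this

theorem pvBIndexD_get (l : List String) (cs : List Char) :
    (pvBIndexD l).get? cs
      = (PySem.List.index? (l.map String.toList) cs).map (fun n => (n : Int)) := by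
  induction l using List.reverseRecOn generalizing cs with
  | nil => simp [pvBIndexD, PySem.List.enumerate_nil, PySem.Dict.get?_empty, PySem.List.index?]
  | append_singleton xs x ih =>
    have henum : PySem.List.enumerate (xs ++ [x]) 0
        = PySem.List.enumerate xs 0 ++ [((0 + (xs.length : Int)), x)] := by
      rw [PySem.List.enumerate_append]; rfl
    unfold pvBIndexD at *
    rw [henum, List.foldl_append]
    simp only [List.foldl_cons, List.foldl_nil]
    by_cases hmem : x.toList ∈ xs.map String.toList
    · have hcont : ((PySem.List.enumerate xs 0).foldl
          (fun d (ic : Int × String) =>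
            if d.contains ic.2.toList then d else d.insert ic.2.toList ic.1)
          PySem.Dict.empty).contains x.toList = true := by
        rw [PySem.Dict.contains_eq_isSome_get?, ih x.toList]
        cases h : PySem.List.index? (xs.map String.toList) x.toList with
        | none => exact absurd hmem ((PySem.List.index?_eq_none_iff _ _).mp h)
        | some k => simp [h]
      rw [if_pos hcont, ih cs, List.map_append]
      simp only [List.map_cons, List.map_nil]
      by_cases hcs : cs ∈ xs.map String.toList
      · rw [PySem.List.index?_append_of_mem _ hcs]
      · by_cases hcsx : cs = x.toList
        · subst hcsx; rw [PySem.List.index?_append_of_mem _ hmem]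
        · have h1 : PySem.List.index? (xs.map String.toList) cs = none := by
            rw [PySem.List.index?_eq_none_iff]; exact hcs
          have h2 : PySem.List.index? (xs.map String.toList ++ [x.toList]) cs = none := by
            rw [PySem.List.index?_eq_none_iff]
            simp [hcs, Ne.symm hcsx, hcsx]
          rw [h1, h2]
          try simp
    · have hcont : ((PySem.List.enumerate xs 0).foldl
          (fun d (ic : Int × String) =>
            if d.contains ic.2.toList then d else d.insert ic.2.toList ic.1)
          PySem.Dict.empty).contains x.toList = false := by
        rw [PySem.Dict.contains_eq_isSome_get?, ih x.toList,
          (PySem.List.index?_eq_none_iff _ _).mpr hmem]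
        simp
      rw [if_neg (by simp [hcont]), List.map_append]
      simp only [List.map_cons, List.map_nil]
      by_cases hcsx : cs = x.toList
      · subst hcsx
        rw [PySem.Dict.get?_insert, if_pos rfl]
        have h3 := PySem.List.index?_append_singleton_self (l := xs.map String.toList)
          (c := x.toList) hmem
        rw [h3]
        simp
      · rw [PySem.Dict.get?_insert, if_neg hcsx, ih cs]
        by_cases hcs : cs ∈ xs.map String.toList
        · rw [PySem.List.index?_append_of_mem _ hcs]
        · have h1 : PySem.List.index? (xs.map String.toList) cs = none := by
            rw [PySem.List.index?_eq_none_iff]; exact hcs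
          have h2 : PySem.List.index? (xs.map String.toList ++ [x.toList]) cs = none := by
            rw [PySem.List.index?_eq_none_iff]; simp [hcs, hcsx]
          rw [h1, h2]
          try simp

theorem pvBestFold_spec (d : PySem.Dict (List Char) Int) (rest : List Char)
    (Ls : List Int) (acc : Option (Int × Nat)) :
    ((Ls.foldl (pvStep d rest) acc) = acc ∨
      ∃ L ∈ Ls, ∃ k, d.get? (rest.take L.toNat) = some k ∧
        Ls.foldl (pvStep d rest) acc = some (k, L.toNat)) ∧
    (∀ p, acc = some p → ∃ q, Ls.foldl (pvStep d rest) acc = some q ∧ q.1 ≤ p.1) ∧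
    (∀ L ∈ Ls, ∀ k, d.get? (rest.take L.toNat) = some k →
      ∃ q, Ls.foldl (pvStep d rest) acc = some q ∧ q.1 ≤ k) := by
  induction Ls generalizing acc with
  | nil =>
    refine ⟨Or.inl rfl, ?_, ?_⟩
    · intro p hp; exact ⟨p, hp, le_refl _⟩
    · intro L hL; simp at hL
  | cons L0 Ls ih =>
    obtain ⟨ih1, ih2, ih3⟩ := ih (pvStep d rest acc L0)
    simp only [List.foldl_cons]
    refine ⟨?_, ?_, ?_⟩
    · -- result is acc or a candidate
      rcases ih1 with heq | ⟨L, hL, k, hk, hres⟩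
      · rw [heq]
        unfold pvStep
        cases hg : d.get? (rest.take L0.toNat) with
        | none => exact Or.inl rfl
        | some idx =>
          cases acc with
          | none => exact Or.inr ⟨L0, List.mem_cons_self, idx, hg, rfl⟩
          | some b =>
            by_cases hlt : idx < b.1
            · exact Or.inr ⟨L0, List.mem_cons_self, idx, hg, by simp [hlt]⟩
            · exact Or.inl (by simp [hlt])
      · exact Or.inr ⟨L, List.mem_cons_of_mem _ hL, k, hk, hres⟩
    · -- dominates the accumulator
      intro p hp
      have hstep : ∃ r, pvStep d rest acc L0 = some r ∧ r.1 ≤ p.1 := by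
        unfold pvStep
        subst hp
        cases hg : d.get? (rest.take L0.toNat) with
        | none => exact ⟨p, rfl, le_refl _⟩
        | some idx =>
          by_cases hlt : idx < p.1
          · exact ⟨(idx, L0.toNat), by simp [hlt], le_of_lt hlt⟩
          · exact ⟨p, by simp [hlt], le_refl _⟩
      obtain ⟨r, hr, hrle⟩ := hstep
      obtain ⟨q, hq, hqle⟩ := ih2 r hr
      exact ⟨q, hq, le_trans hqle hrle⟩
    · -- dominates every candidate
      intro L hL k hk
      rcases List.mem_cons.1 hL with rfl | hL'
      · have hstep : ∃ r, pvStep d rest acc L = some r ∧ r.1 ≤ k := by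
          unfold pvStep
          rw [hk]
          cases acc with
          | none => exact ⟨(k, L.toNat), rfl, le_refl _⟩
          | some b =>
            by_cases hlt : k < b.1
            · exact ⟨(k, L.toNat), by simp [hlt], le_refl _⟩
            · exact ⟨b, by simp [hlt], by omega⟩
        obtain ⟨r, hr, hrle⟩ := hstep
        obtain ⟨q, hq, hqle⟩ := ih2 r hr
        exact ⟨q, hq, le_trans hqle hrle⟩
      · exact ih3 L hL' k hk

theorem pvBest_core (l : List String) (hne : "" ∉ l) (ch : Char) (tl : List Char)
    (d : PySem.Dict (List Char) Int)
    (hd : ∀ cs, d.get? cs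
      = (PySem.List.index? (l.map String.toList) cs).map (fun n => (n : Int)))
    (m : Int) (hm : ∀ c ∈ l, ((c.toList.length : Int)) ≤ m) :
    (match l.find? (fun c => c.toList.isPrefixOf (ch :: tl)) with
     | none =>
        (PySem.List.pyRange 1 (min m (((ch :: tl).length : Int)) + 1) 1).foldl
          (pvStep d (ch :: tl)) none = none
     | some c0 => ∃ k,
        (PySem.List.pyRange 1 (min m (((ch :: tl).length : Int)) + 1) 1).foldl
          (pvStep d (ch :: tl)) none = some (k, c0.toList.length) ∧
        c0.toList <+: (ch :: tl)) := by
  set rest := ch :: tl with hrest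
  set Ls := PySem.List.pyRange 1 (min m ((rest.length : Int)) + 1) 1 with hLs
  cases hfind : l.find? (fun c => c.toList.isPrefixOf rest) with
  | none =>
    have hall := List.find?_eq_none.1 hfind
    obtain ⟨h1, _, _⟩ := pvBestFold_spec d rest Ls none
    rcases h1 with heq | ⟨L, hL, k, hk, hres⟩
    · exact heq
    · exfalso
      rw [hd] at hk
      cases hidx : PySem.List.index? (l.map String.toList) (rest.take L.toNat) with
      | none => rw [hidx] at hk; simp at hk
      | some kn =>
        have hmem : rest.take L.toNat ∈ l.map String.toList := by
          by_contra hno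
          rw [(PySem.List.index?_eq_none_iff _ _).mpr hno] at hidx; cases hidx
        obtain ⟨c, hcl, hcs⟩ := List.mem_map.1 hmem
        have hp : c.toList.isPrefixOf rest = true := by
          rw [hcs]
          exact List.isPrefixOf_iff_prefix.2 (List.take_prefix _ _)
        exact absurd hp (by simpa using hall c hcl)
  | some c0 =>
    obtain ⟨hP, as, bs, hsplit, hprior⟩ := List.find?_eq_some_iff_append.1 hfind
    subst hsplit
    have hc0l : c0 ∈ as ++ c0 :: bs := by simp
    have hc0ne : c0.toList ≠ [] := by
      intro h
      have : c0 = "" := by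
        have := congrArg String.ofList h
        simpa using this
      exact hne (this ▸ hc0l)
    have hpre0 : c0.toList <+: rest := List.isPrefixOf_iff_prefix.1 hP
    have hlen_n : c0.toList.length ≤ rest.length := hpre0.length_le
    have hlen_m : ((c0.toList.length : Int)) ≤ m := hm c0 hc0l
    have hL0mem : ((c0.toList.length : Int)) ∈ Ls := by
      rw [hLs, PySem.List.mem_pyRange_one]
      constructor
      · have : 0 < c0.toList.length := List.length_pos_iff.2 hc0ne
        omega
      · omega
    have htake0 : rest.take ((c0.toList.length : Int)).toNat = c0.toList := by
      rw [Int.toNat_natCast]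
      exact (List.prefix_iff_eq_take.1 hpre0).symm
    have hmem0 : c0.toList ∈ (as ++ c0 :: bs).map String.toList := List.mem_map_of_mem hc0l
    cases hidx0 : PySem.List.index? ((as ++ c0 :: bs).map String.toList) c0.toList with
    | none => exact absurd hmem0 ((PySem.List.index?_eq_none_iff _ _).mp hidx0)
    | some k0 =>
      have hget0 : d.get? (rest.take ((c0.toList.length : Int)).toNat) = some (k0 : Int) := by
        rw [htake0, hd, hidx0]; rfl
      obtain ⟨h1, _, h3⟩ := pvBestFold_spec d rest Ls none
      obtain ⟨q, hq, hqle⟩ := h3 _ hL0mem _ hget0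
      rcases h1 with heq | ⟨L, hL, kk, hkk, hres⟩
      · rw [heq] at hq; cases hq
      · rw [hres] at hq
        obtain rfl : q = (kk, L.toNat) := (Option.some.inj hq).symm
        rw [hd] at hkk
        cases hidx : PySem.List.index? ((as ++ c0 :: bs).map String.toList) (rest.take L.toNat) with
        | none => rw [hidx] at hkk; cases hkk
        | some kn =>
          rw [hidx] at hkk
          have hkkkn : kk = (kn : Int) := by simpa using hkk.symm
          have hLb := (PySem.List.mem_pyRange_one).1 (hLs ▸ hL)
          have hLn : L.toNat ≤ rest.length := by omega
          obtain ⟨hknlt, hknel, hknfirst⟩ := PySem.List.getElem_of_index?_eq_some hidx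
          have hknlt' : kn < (as ++ c0 :: bs).length := by simpa using hknlt
          rw [List.getElem_map] at hknel
          have hknel' : ((as ++ c0 :: bs)[kn]'hknlt').toList = rest.take L.toNat := hknel
          have hpkn : ((as ++ c0 :: bs)[kn]'hknlt').toList.isPrefixOf rest = true := by
            rw [hknel']
            exact List.isPrefixOf_iff_prefix.2 (List.take_prefix _ _)
          have hasle : as.length ≤ kn := by
            by_contra hlt
            push_neg at hlt
            have heq1 : (as ++ c0 :: bs)[kn]'hknlt' = as[kn]'hlt :=
              List.getElem_append_left hlt
            have hmemas : (as ++ c0 :: bs)[kn]'hknlt' ∈ as := by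
              rw [heq1]; exact List.getElem_mem _
            have hf : ((as ++ c0 :: bs)[kn]'hknlt').toList.isPrefixOf rest = false := by
              simpa using hprior _ hmemas
            rw [hpkn] at hf; cases hf
          obtain ⟨hk0lt, hk0el, hk0first⟩ := PySem.List.getElem_of_index?_eq_some hidx0
          have haslenlt : as.length < (as ++ c0 :: bs).length := by simp
          have hasel : (as ++ c0 :: bs)[as.length]'haslenlt = c0 := by
            rw [List.getElem_append_right (le_refl _)]
            simp
          have hk0le : k0 ≤ as.length := by
            by_contra hgt
            push_neg at hgt
            have hne2 := hk0first as.length hgt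
            have : ((as ++ c0 :: bs).map String.toList)[as.length]'(by simpa using haslenlt)
                = c0.toList := by
              rw [List.getElem_map]
              exact congrArg String.toList hasel
            exact hne2 this
          have hknk0 : kn ≤ k0 := by
            have := hqle
            rw [hkkkn] at this
            simp at this
            exact_mod_cast this
          have hkneq : kn = as.length := le_antisymm (by omega) hasle
          subst hkneq
          have htakeq : rest.take L.toNat = c0.toList := by
            rw [← hknel']
            exact congrArg String.toList hasel
          have hLeq : L.toNat = c0.toList.length := by
            have h1 : (rest.take L.toNat).length = c0.toList.length := by rw [htakeq]
            rw [List.length_take] at h1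
            omega
          exact ⟨kk, by rw [hres, hLeq], hpre0⟩

theorem pvBIndex_max (l : List String) :
    ∀ c ∈ l, ((c.toList.length : Int)) ≤ (pvBIndex l).2 := by
  rw [pvBIndex_eq]
  exact pvBIndex_max' l

theorem pvBIndex_get (l : List String) (cs : List Char) :
    (pvBIndex l).1.get? cs
      = (PySem.List.index? (l.map String.toList) cs).map (fun n => (n : Int)) := by
  rw [pvBIndex_eq]
  exact pvBIndexD_get l cs

theorem pvLoop_eq (l : List String) (hne : "" ∉ l) (fuel : Nat) (rest : List Char) :
    pvALoop l fuel rest = pvBLoop (pvBIndex l).1 (pvBIndex l).2 fuel rest := by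
  induction fuel generalizing rest with
  | zero => rfl
  | succ fuel ih =>
    cases rest with
    | nil => rfl
    | cons ch tl =>
      have hcore := pvBest_core l hne ch tl (pvBIndex l).1 (pvBIndex_get l)
        (pvBIndex l).2 (pvBIndex_max l)
      unfold pvALoop pvBLoop pvFindA
      rw [pvBBest_eq]
      cases hfind : l.find? (fun c => c.toList.isPrefixOf (ch :: tl)) with
      | none =>
        rw [hfind] at hcore
        simp only at hcore
        rw [hcore]
        simp [pvFindA, hfind, ih]
      | some c0 =>
        rw [hfind] at hcore
        simp only at hcore
        obtain ⟨k, hbest, hpre⟩ := hcore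
        rw [hbest]
        have htake : (ch :: tl).take c0.toList.length = c0.toList :=
          (List.prefix_iff_eq_take.1 hpre).symm
        simp only [htake, String.ofList_toList]
        exact congrArg _ (ih _)

-- ===== VERDICT (by name: the statement is the Claim_ definition above) =====
theorem split_by_consonants_spec : Claim_equal_split_by_consonants := by
  intro word consonants _ hpre
  unfold Spec_split_by_consonants split_by_consonants split_by_consonants_alt
  rcases hpre with h | h
  · subst h; rfl
  · exact pvLoop_eq consonants h _ _
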